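-- pv_equiv track=rewrite | github.com/FahrenheitResearch/wrf-gpu-port | patches/patch_diffusion_comprehensive.py | find_subroutine_bounds
-- ===== SOURCE A (Python) =====
-- def find_subroutine_bounds(lines, sub_name):
--     """Find start and end line indices for a subroutine."""
--     sub_start = None
--     sub_end = None
--     target = "SUBROUTINE " + sub_name.upper()
--
--     for i, line in enumerate(lines):
--         stripped = line.strip().upper()
--         if target in stripped and not stripped.startswith("END"):
--             if sub_start is None:
--                 sub_start = i
--         if sub_start is not None and sub_end is None:
--             if stripped.startswith("END SUBROUTINE"):
--                 # Match either END SUBROUTINE or END SUBROUTINE name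
--                 if sub_name.upper() in stripped or stripped == "END SUBROUTINE":
--                     sub_end = i
--                     break
--
--     return sub_start, sub_end
-- ===== SOURCE B (Python) =====
-- def find_subroutine_bounds(lines, sub_name):
--     """Find start and end line indices for a subroutine.
--
--     Single right-to-left pass: walking backwards we maintain the first
--     matching END line of the suffix seen so far, and overwrite the answer
--     each time a start line appears, so the earliest start (with the first
--     END after it) remains when the scan finishes.
--     """
--     name = sub_name.upper()
--     target = "SUBROUTINE " + name
--     first_end = None
--     ans = (None, None)
--     for i in range(len(lines) - 1, -1, -1):
--         s = lines[i].strip().upper()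
--         if s.startswith("END SUBROUTINE") and (name in s or s == "END SUBROUTINE"):
--             first_end = i
--         if target in s and not s.startswith("END"):
--             ans = (i, first_end)
--     return ans
-- ===== Notes on version B (the rewrite author's own statement) =====
-- stated objective: alternative
-- what changed: A's forward state-machine loop with (sub_start, sub_end) flags and a break is replaced by a single right-to-left pass that carries the first matching END index of the suffix and overwrites the answer at each start line, so the earliest start paired with the first END after it survives.
import Mathlib
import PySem

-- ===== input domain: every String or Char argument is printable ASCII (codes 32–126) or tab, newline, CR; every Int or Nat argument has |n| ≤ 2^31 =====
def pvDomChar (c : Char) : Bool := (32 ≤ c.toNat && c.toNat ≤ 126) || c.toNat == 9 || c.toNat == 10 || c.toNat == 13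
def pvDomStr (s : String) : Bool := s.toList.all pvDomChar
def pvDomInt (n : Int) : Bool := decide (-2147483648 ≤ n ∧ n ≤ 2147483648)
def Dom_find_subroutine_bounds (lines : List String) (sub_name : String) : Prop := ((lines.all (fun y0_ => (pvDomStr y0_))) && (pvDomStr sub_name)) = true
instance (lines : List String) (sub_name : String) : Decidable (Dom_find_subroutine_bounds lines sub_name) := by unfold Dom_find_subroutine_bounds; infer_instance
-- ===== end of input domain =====

-- B replaces A's forward state-machine loop (with break) by a single right-to-left pass
-- carrying the first END index of the suffix; objective: alternative — no speed claim.

-- ===== PORT A =====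
-- A's for-loop with state (sub_start, sub_end) and break, transcribed as structural recursion;
-- target = "SUBROUTINE " + sub_name.upper() and name = sub_name.upper() are computed before the loop.
def pvLoopA (target name : List Char) (ls : List String) (i : Int) (sub_start : Option Int) :
    Option Int × Option Int :=
  match ls with
  | [] => (sub_start, none)
  | line :: rest =>
    let stripped := PySem.Chars.upper (PySem.Chars.strip line.toList)
    let sub_start :=
      if PySem.Chars.isIn target stripped && !PySem.Chars.startswith stripped "END".toList then
        (if sub_start = none then some i else sub_start)
      else sub_start
    if sub_start.isSome then
      if PySem.Chars.startswith stripped "END SUBROUTINE".toList then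
        if PySem.Chars.isIn name stripped || stripped = "END SUBROUTINE".toList then
          (sub_start, some i)   -- break
        else pvLoopA target name rest (i + 1) sub_start
      else pvLoopA target name rest (i + 1) sub_start
    else pvLoopA target name rest (i + 1) sub_start

def find_subroutine_bounds (lines : List String) (sub_name : String) : Option Int × Option Int :=
  pvLoopA ("SUBROUTINE ".toList ++ PySem.Chars.upper sub_name.toList)
    (PySem.Chars.upper sub_name.toList) lines 0 none

-- ===== PORT B =====
-- B's backward loop: recurse over the suffix first, then combine on the way back;
-- returns (first_end of the suffix starting at index i, answer (ans) for that suffix).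
def pvScanB (target name : List Char) (ls : List String) (i : Int) :
    Option Int × (Option Int × Option Int) :=
  match ls with
  | [] => (none, (none, none))
  | line :: rest =>
    let p := pvScanB target name rest (i + 1)
    let s := PySem.Chars.upper (PySem.Chars.strip line.toList)
    let fe := if PySem.Chars.startswith s "END SUBROUTINE".toList
        && (PySem.Chars.isIn name s || s = "END SUBROUTINE".toList) then some i else p.1
    let ans := if PySem.Chars.isIn target s && !PySem.Chars.startswith s "END".toList
        then (some i, fe) else p.2
    (fe, ans)

def find_subroutine_bounds_alt (lines : List String) (sub_name : String) :
    Option Int × Option Int :=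
  let name := PySem.Chars.upper sub_name.toList
  let target := "SUBROUTINE ".toList ++ name
  (pvScanB target name lines 0).2

-- ===== PRECONDITION & SPEC =====
def Spec_find_subroutine_bounds (lines : List String) (sub_name : String) (out : Option Int × Option Int) : Prop := out = find_subroutine_bounds_alt lines sub_name
instance (lines : List String) (sub_name : String) (out : Option Int × Option Int) : Decidable (Spec_find_subroutine_bounds lines sub_name out) := by unfold Spec_find_subroutine_bounds; infer_instance

-- ===== CLAIM (what is proved, stated in full; the proofs are below) =====
def Claim_equal_find_subroutine_bounds : Prop := ∀ (lines : List String) (sub_name : String), Dom_find_subroutine_bounds lines sub_name → Spec_find_subroutine_bounds lines sub_name (find_subroutine_bounds lines sub_name)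

-- ===== LEMMAS AND PROOFS =====

-- proof-side helper: first matching END index at or after i (forward characterisation)
def pvFindEnd (name : List Char) (ls : List String) (i : Int) : Option Int :=
  match ls with
  | [] => none
  | line :: rest =>
    let s := PySem.Chars.upper (PySem.Chars.strip line.toList)
    if PySem.Chars.startswith s "END SUBROUTINE".toList
        && (PySem.Chars.isIn name s || s = "END SUBROUTINE".toList) then some i
    else pvFindEnd name rest (i + 1)

-- the first component of B's backward scan is the first matching END index
theorem pvScanB_fst (target name : List Char) (ls : List String) (i : Int) :
    (pvScanB target name ls i).1 = pvFindEnd name ls i := by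
  induction ls generalizing i with
  | nil => rfl
  | cons l rest ih =>
    simp only [pvScanB, pvFindEnd]
    split_ifs <;> simp_all

-- once the start is found, A's remaining loop is exactly the first-END search
theorem pvLoopA_after_start (target name : List Char) (ls : List String) (i s : Int) :
    pvLoopA target name ls i (some s) = (some s, pvFindEnd name ls i) := by
  induction ls generalizing i with
  | nil => rfl
  | cons l rest ih =>
    simp only [pvLoopA, pvFindEnd]
    split_ifs <;> simp_all

-- a line that starts the subroutine cannot start with "END", hence not with "END SUBROUTINE"
theorem pvStart_not_end (s target : List Char)
    (h : (PySem.Chars.isIn target s && !PySem.Chars.startswith s "END".toList) = true) :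
    PySem.Chars.startswith s "END SUBROUTINE".toList = false := by
  have h2 : PySem.Chars.startswith s "END".toList = false := by
    cases hx : PySem.Chars.startswith s "END".toList
    · rfl
    · rw [hx] at h; simp at h
  cases hB : PySem.Chars.startswith s "END SUBROUTINE".toList
  · rfl
  · exfalso
    have hpre : "END SUBROUTINE".toList <+: s := (PySem.Chars.startswith_iff _ _).mp hB
    have hEND : "END".toList <+: s := List.IsPrefix.trans (by decide) hpre
    rw [(PySem.Chars.startswith_iff _ _).mpr hEND] at h2
    exact Bool.true_eq_false.mp h2

-- the main correspondence: A's loop from index i equals B's backward scan from index i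
theorem pvLoopA_eq (target name : List Char) (ls : List String) (i : Int) :
    pvLoopA target name ls i none = (pvScanB target name ls i).2 := by
  induction ls generalizing i with
  | nil => rfl
  | cons l rest ih =>
    simp only [pvLoopA, pvScanB]
    by_cases h : (PySem.Chars.isIn target (PySem.Chars.upper (PySem.Chars.strip l.toList))
        && !PySem.Chars.startswith (PySem.Chars.upper (PySem.Chars.strip l.toList))
            "END".toList) = true
    · -- start found at this line
      have hne := pvStart_not_end _ _ h
      rw [if_pos h, if_pos trivial]
      rw [if_pos (show (some i : Option Int).isSome = true from rfl)]
      rw [if_neg (show ¬ PySem.Chars.startswith (PySem.Chars.upper (PySem.Chars.strip l.toList))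
            "END SUBROUTINE".toList = true by rw [hne]; decide)]
      rw [if_pos h]
      rw [pvLoopA_after_start]
      simp only [hne, Bool.false_and, Bool.false_eq_true, if_false, pvScanB_fst]
    · -- keep scanning
      rw [if_neg h, if_neg h]
      simp only [Option.isSome_none, Bool.false_eq_true, if_false]
      exact ih (i + 1)

-- ===== VERDICT (by name: the statement is the Claim_ definition above) =====
theorem find_subroutine_bounds_spec : Claim_equal_find_subroutine_bounds := by
  intro lines sub_name _
  unfold Spec_find_subroutine_bounds find_subroutine_bounds find_subroutine_bounds_alt
  exact pvLoopA_eq _ _ lines 0
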